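-- pv_equiv track=rewrite | github.com/daniel-reich/ubiquitous-fiesta | hY6BMxxEYycT83GPs_16.py | multiply_by_11
-- ===== SOURCE A (Python) =====
-- def multiply_by_11(n):
--   n += '0'
--   res = [0,int(n[0])]
--   for a,b in zip(n,n[1:]):
--     cry,nxt = divmod(int(a)+int(b),10)
--     i = -1
--     while cry:
--       cry,res[i] = divmod(cry+res[i],10)
--       i-=1
--     res.append(nxt)
--   return ''.join(map(str,res[1:] if res[0] == 0 else res))
-- ===== SOURCE B (Python) =====
-- def multiply_by_11(n):
--     # shift-and-add: n*11 = n*10 + n, one right-to-left addition pass with a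
--     # forward carry; leading zeros are preserved, '' gives '0', like A.
--     ds = [int(c) for c in n]
--     out = []
--     carry = 0
--     for x, y in zip(reversed(ds + [0]), reversed([0] + ds)):
--         carry, d = divmod(x + y + carry, 10)
--         out.append(d)
--     digs = list(reversed(out)) if carry == 0 else [carry] + list(reversed(out))
--     return ''.join(map(str, digs))
-- ===== Notes on version B (the rewrite author's own statement) =====
-- stated objective: simpler
-- what changed: A emits digits left-to-right and fixes each overflow by walking a backward carry-repair while-loop over the already-emitted digits; B instead adds the two decimal strings n*10 and n in one right-to-left pass with a single forward carry, then prepends the final carry if nonzero.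
import Mathlib
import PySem

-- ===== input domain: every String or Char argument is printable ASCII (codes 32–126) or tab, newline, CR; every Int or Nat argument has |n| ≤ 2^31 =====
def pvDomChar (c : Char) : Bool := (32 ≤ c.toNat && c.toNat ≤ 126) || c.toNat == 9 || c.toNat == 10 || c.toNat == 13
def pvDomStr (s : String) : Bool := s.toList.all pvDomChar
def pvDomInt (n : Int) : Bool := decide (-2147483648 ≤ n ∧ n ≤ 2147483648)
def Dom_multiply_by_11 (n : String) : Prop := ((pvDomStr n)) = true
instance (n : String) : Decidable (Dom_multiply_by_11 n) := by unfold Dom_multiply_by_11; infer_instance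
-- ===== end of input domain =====

-- B replaces A's left-to-right digit emission with backward carry repair by a single
-- right-to-left addition of n*10 and n with a forward carry (same return value on Pre_).

-- int(c) for a single character c; exact where c is a decimal digit (Pre_ admits only
-- those inputs: on anything else Python's int() raises ValueError).
def pyDigit (c : Char) : Int := (PySem.Int.ofChars? [c]).getD 0

-- ===== PORT A =====
-- the 'while cry:' carry-repair loop of A, acting on the REVERSED res (i = -1, -2, …);
-- the [] case is Python's IndexError, unreachable on Pre_ (proved via propagateA_spec)
def propagateA : Int → List Int → List Int
  | cry, rev =>
    if cry = 0 then rev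
    else
      match rev with
      | [] => []
      | d :: rest =>
        PySem.Int.mod (cry + d) 10 :: propagateA (PySem.Int.floordiv (cry + d) 10) rest

-- one iteration of A's for-loop body (divmod with the literal divisor 10)
def stepA (res : List Int) (p : Char × Char) : List Int :=
  let s := pyDigit p.1 + pyDigit p.2
  let cry := PySem.Int.floordiv s 10
  let nxt := PySem.Int.mod s 10
  ((propagateA cry res.reverse).reverse) ++ [nxt]

def multiply_by_11 (n : String) : String :=
  let m := n.toList ++ ['0']                      -- n += '0'
  let res0 : List Int := [0, pyDigit m.headI]     -- res = [0, int(n[0])]; m is nonempty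
  let res := (m.zip (m.drop 1)).foldl stepA res0  -- for a,b in zip(n, n[1:])
  let final := if res.headI = 0 then res.drop 1 else res  -- res[1:] if res[0]==0 else res; res nonempty
  PySem.Str.join "" (final.map PySem.Int.toStr)   -- ''.join(map(str, …))

-- ===== PORT B =====
-- one iteration of B's for-loop body: state = (carry, out)
def stepB (st : Int × List Int) (q : Int × Int) : Int × List Int :=
  let s := q.1 + q.2 + st.1
  (PySem.Int.floordiv s 10, st.2 ++ [PySem.Int.mod s 10])

def multiply_by_11_alt (n : String) : String :=
  let ds := n.toList.map pyDigit                  -- ds = [int(c) for c in n]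
  let st := (((ds ++ [0]).reverse.zip ((0 :: ds).reverse))).foldl stepB (0, ([] : List Int))
  let digs := if st.1 = 0 then st.2.reverse else st.1 :: st.2.reverse
  PySem.Str.join "" (digs.map PySem.Int.toStr)

-- ===== PRECONDITION & SPEC =====
-- Pre_ admits exactly the strings of decimal digits (possibly empty): on any other
-- character A's int() raises ValueError.
def Pre_multiply_by_11 (n : String) : Prop :=
  (n.toList.all fun c => decide ('0' ≤ c) && decide (c ≤ '9')) = true
instance (n : String) : Decidable (Pre_multiply_by_11 n) := by unfold Pre_multiply_by_11; infer_instance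

def pvWitness_multiply_by_11 : String := "905"

def Spec_multiply_by_11 (n : String) (out : String) : Prop := out = multiply_by_11_alt n
instance (n : String) (out : String) : Decidable (Spec_multiply_by_11 n out) := by unfold Spec_multiply_by_11; infer_instance

-- ===== CLAIM (what is proved, stated in full; the proofs are below) =====
def Claim_equal_multiply_by_11 : Prop := ∀ (n : String), Dom_multiply_by_11 n → Pre_multiply_by_11 n → Spec_multiply_by_11 n (multiply_by_11 n)

-- ===== LEMMAS AND PROOFS =====

-- value of a most-significant-digit-first list of (not necessarily bounded) digits
def valF : List Int → Int
  | [] => 0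
  | d :: r => d * 10 ^ r.length + valF r

theorem valF_nonneg (l : List Int) (h : ∀ d ∈ l, 0 ≤ d) : 0 ≤ valF l := by
  induction l with
  | nil => simp [valF]
  | cons d r ih =>
    have hd := h d (by simp)
    have hr := ih (fun x hx => h x (by simp [hx]))
    have : (0:Int) ≤ d * 10 ^ r.length := by positivity
    simp only [valF]; omega

theorem valF_lt (l : List Int) (h : ∀ d ∈ l, 0 ≤ d ∧ d < 10) : valF l < 10 ^ l.length := by
  induction l with
  | nil => simp [valF]
  | cons d r ih =>
    have hd := h d (by simp)
    have hr := ih (fun x hx => h x (by simp [hx]))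
    have h1 : d * 10 ^ r.length ≤ 9 * 10 ^ r.length := by
      have : (0:Int) < 10 ^ r.length := by positivity
      nlinarith
    simp only [valF, List.length_cons, pow_succ]
    nlinarith [hr, h1]

theorem valF_append_singleton (l : List Int) (x : Int) : valF (l ++ [x]) = 10 * valF l + x := by
  induction l with
  | nil => simp [valF]
  | cons d r ih => simp only [List.cons_append, valF, List.length_append, List.length_cons,
      List.length_nil, ih]; ring

theorem valF_eq_iff (l1 l2 : List Int) (hlen : l1.length = l2.length)
    (h1 : ∀ d ∈ l1, 0 ≤ d ∧ d < 10) (h2 : ∀ d ∈ l2, 0 ≤ d ∧ d < 10)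
    (hv : valF l1 = valF l2) : l1 = l2 := by
  induction l1 generalizing l2 with
  | nil => cases l2 with
    | nil => rfl
    | cons b t => simp at hlen
  | cons a r ih =>
    cases l2 with
    | nil => simp at hlen
    | cons b t =>
      have hlen' : r.length = t.length := by simpa using hlen
      have ha := h1 a (by simp)
      have hb := h2 b (by simp)
      have hr : ∀ d ∈ r, 0 ≤ d ∧ d < 10 := fun x hx => h1 x (by simp [hx])
      have ht : ∀ d ∈ t, 0 ≤ d ∧ d < 10 := fun x hx => h2 x (by simp [hx])
      have hrlt := valF_lt r hr
      have htlt := valF_lt t ht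
      have hrnn := valF_nonneg r (fun x hx => (hr x hx).1)
      have htnn := valF_nonneg t (fun x hx => (ht x hx).1)
      have hP : (0:Int) < 10 ^ r.length := by positivity
      simp only [valF, hlen'] at hv
      have hab : a = b := by
        have hP' : (0:Int) < 10 ^ t.length := by positivity
        rw [hlen'] at hrlt
        rcases lt_trichotomy a b with hlt | heq | hgt
        · exfalso
          have h1 : (a + 1) * 10 ^ t.length ≤ b * 10 ^ t.length := by nlinarith
          rw [add_mul, one_mul] at h1
          linarith
        · exact heq
        · exfalso
          have h1 : (b + 1) * 10 ^ t.length ≤ a * 10 ^ t.length := by nlinarith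
          rw [add_mul, one_mul] at h1
          linarith
      subst hab
      have hvt : valF r = valF t := by omega
      rw [ih t hlen' hr ht hvt]

-- divmod facts for the literal divisor 10
theorem divmod10 (x : Int) : 10 * PySem.Int.floordiv x 10 + PySem.Int.mod x 10 = x ∧
    0 ≤ PySem.Int.mod x 10 ∧ PySem.Int.mod x 10 < 10 := by
  simp [PySem.Int.floordiv, PySem.Int.mod, Int.fmod_eq_emod, Int.fdiv_eq_ediv]
  omega

theorem propagateA_spec (rev : List Int) : ∀ (cry : Int), 0 ≤ cry →
    (∀ d ∈ rev, 0 ≤ d ∧ d < 10) → cry + valF rev.reverse < 10 ^ rev.length →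
    (propagateA cry rev).length = rev.length ∧
    (∀ d ∈ propagateA cry rev, 0 ≤ d ∧ d < 10) ∧
    valF (propagateA cry rev).reverse = cry + valF rev.reverse := by
  induction rev with
  | nil =>
    intro cry h0 _ hlt
    rw [propagateA]
    rcases eq_or_ne cry 0 with h | h
    · simp [h]
    · exfalso; simp [valF] at hlt; omega
  | cons d rest ih =>
    intro cry h0 hb hlt
    rw [propagateA]
    rcases eq_or_ne cry 0 with h | h
    · subst h
      refine ⟨by simp, fun x hx => hb x (by simpa using hx), by simp⟩
    · simp only [if_neg h]
      have hd := hb d (by simp)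
      have hrest : ∀ x ∈ rest, 0 ≤ x ∧ x < 10 := fun x hx => hb x (by simp [hx])
      have hVr : 0 ≤ valF rest.reverse :=
        valF_nonneg _ (fun x hx => (hrest x (by simpa using hx)).1)
      have hdm := divmod10 (cry + d)
      set m := PySem.Int.mod (cry + d) 10 with hm
      set cry' := PySem.Int.floordiv (cry + d) 10 with hc
      have hrev : valF (d :: rest).reverse = 10 * valF rest.reverse + d := by
        rw [List.reverse_cons, valF_append_singleton]
      rw [hrev] at hlt
      have hpow : (10:Int) ^ (d :: rest).length = 10 * 10 ^ rest.length := by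
        rw [List.length_cons, pow_succ]; ring
      rw [hpow] at hlt
      have hc0 : 0 ≤ cry' := by omega
      have hclt : cry' + valF rest.reverse < 10 ^ rest.length := by omega
      obtain ⟨ihl, ihb, ihv⟩ := ih cry' hc0 hrest hclt
      refine ⟨by simp [ihl], ?_, ?_⟩
      · intro x hx
        rcases List.mem_cons.mp hx with hx | hx
        · subst hx; exact ⟨hdm.2.1, hdm.2.2⟩
        · exact ihb x hx
      · rw [List.reverse_cons, valF_append_singleton, ihv, hrev]
        omega

theorem A_fold_spec (ps : List (Char × Char)) : ∀ (res : List Int),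
    (∀ p ∈ ps, (0 ≤ pyDigit p.1 ∧ pyDigit p.1 < 10) ∧ (0 ≤ pyDigit p.2 ∧ pyDigit p.2 < 10)) →
    (∀ d ∈ res, 0 ≤ d ∧ d < 10) → valF res + 2 ≤ 10 ^ res.length →
    (ps.foldl stepA res).length = res.length + ps.length ∧
    (∀ d ∈ ps.foldl stepA res, 0 ≤ d ∧ d < 10) ∧
    valF (ps.foldl stepA res) = valF res * 10 ^ ps.length +
      valF (ps.map (fun p => pyDigit p.1 + pyDigit p.2)) := by
  induction ps with
  | nil => intro res _ hb hv; exact ⟨by simp, hb, by simp [valF]⟩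
  | cons p ps ih =>
    intro res hps hb hv
    have hp := hps p (by simp)
    have hps' : ∀ q ∈ ps, (0 ≤ pyDigit q.1 ∧ pyDigit q.1 < 10) ∧ (0 ≤ pyDigit q.2 ∧ pyDigit q.2 < 10) :=
      fun q hq => hps q (by simp [hq])
    have hdm := divmod10 (pyDigit p.1 + pyDigit p.2)
    set s := pyDigit p.1 + pyDigit p.2 with hs
    set cry := PySem.Int.floordiv s 10 with hcry
    set nxt := PySem.Int.mod s 10 with hnxt
    have hcry01 : 0 ≤ cry ∧ cry ≤ 1 := by omega
    have hVnn : 0 ≤ valF res := valF_nonneg _ (fun x hx => (hb x hx).1)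
    have hprop := propagateA_spec res.reverse cry hcry01.1
      (fun x hx => hb x (by simpa using hx))
      (by rw [List.reverse_reverse, List.length_reverse]; omega)
    rw [List.reverse_reverse, List.length_reverse] at hprop
    obtain ⟨hPl, hPb, hPv⟩ := hprop
    have hstep : stepA res p = (propagateA cry res.reverse).reverse ++ [nxt] := rfl
    have hr1b : ∀ x ∈ (propagateA cry res.reverse).reverse ++ [nxt], 0 ≤ x ∧ x < 10 := by
      intro x hx
      rcases List.mem_append.mp hx with hx | hx
      · exact hPb x (by simpa using hx)
      · simp at hx; subst hx; exact ⟨hdm.2.1, hdm.2.2⟩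
    have hr1l : ((propagateA cry res.reverse).reverse ++ [nxt]).length = res.length + 1 := by
      simp [hPl]
    have hr1v : valF ((propagateA cry res.reverse).reverse ++ [nxt]) = 10 * valF res + s := by
      rw [valF_append_singleton, hPv]; omega
    have hr1hv : valF ((propagateA cry res.reverse).reverse ++ [nxt]) + 2 ≤
        10 ^ ((propagateA cry res.reverse).reverse ++ [nxt]).length := by
      rw [hr1v, hr1l, pow_succ]
      have : valF res + 2 ≤ 10 ^ res.length := hv
      omega
    obtain ⟨ihl, ihb, ihv⟩ := ih _ hps' hr1b hr1hv
    rw [List.foldl_cons, hstep]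
    refine ⟨by simp [ihl, hr1l]; omega, ihb, ?_⟩
    rw [ihv, hr1v, List.map_cons]
    show _ = valF res * 10 ^ (ps.length + 1) + valF (s :: ps.map fun p => pyDigit p.1 + pyDigit p.2)
    rw [valF]
    simp only [List.length_map, pow_succ]
    ring

theorem B_fold_spec (qs : List (Int × Int)) : ∀ (st : Int × List Int),
    (∀ q ∈ qs, (0 ≤ q.1 ∧ q.1 < 10) ∧ (0 ≤ q.2 ∧ q.2 < 10)) →
    0 ≤ st.1 → (∀ d ∈ st.2, 0 ≤ d ∧ d < 10) →
    (qs.foldl stepB st).2.length = st.2.length + qs.length ∧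
    (∀ d ∈ (qs.foldl stepB st).2, 0 ≤ d ∧ d < 10) ∧ 0 ≤ (qs.foldl stepB st).1 ∧
    valF (qs.foldl stepB st).2.reverse + (qs.foldl stepB st).1 * 10 ^ (qs.foldl stepB st).2.length =
      valF st.2.reverse + (st.1 + valF ((qs.map (fun q => q.1 + q.2)).reverse)) * 10 ^ st.2.length := by
  induction qs with
  | nil => intro st _ hc hb; exact ⟨by simp, hb, hc, by simp [valF]⟩
  | cons q qs ih =>
    intro st hqs hc hb
    have hq := hqs q (by simp)
    have hqs' : ∀ r ∈ qs, (0 ≤ r.1 ∧ r.1 < 10) ∧ (0 ≤ r.2 ∧ r.2 < 10) :=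
      fun r hr => hqs r (by simp [hr])
    have hdm := divmod10 (q.1 + q.2 + st.1)
    set s := q.1 + q.2 + st.1 with hs
    set cry' := PySem.Int.floordiv s 10 with hcry
    set m := PySem.Int.mod s 10 with hm
    have hstep : stepB st q = (cry', st.2 ++ [m]) := rfl
    have hc' : 0 ≤ cry' := by omega
    have hb' : ∀ x ∈ st.2 ++ [m], 0 ≤ x ∧ x < 10 := by
      intro x hx
      rcases List.mem_append.mp hx with hx | hx
      · exact hb x hx
      · simp at hx; subst hx; exact ⟨hdm.2.1, hdm.2.2⟩
    obtain ⟨ihl, ihb, ihc, ihv⟩ := ih (cry', st.2 ++ [m]) hqs' hc' hb'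
    rw [List.foldl_cons, hstep]
    refine ⟨by simp [ihl]; omega, ihb, ihc, ?_⟩
    rw [ihv]
    simp only [List.reverse_append, List.reverse_cons, List.reverse_nil, List.nil_append,
      List.singleton_append, List.length_append, List.length_cons, List.length_nil, List.map_cons,
      valF, List.length_reverse]
    rw [valF_append_singleton]
    have h10 : (10:Int) * cry' + m = s := hdm.1
    linear_combination ((10:Int) ^ st.2.length) * h10

theorem pyDigit_bounds (c : Char) (h : '0' ≤ c ∧ c ≤ '9') : 0 ≤ pyDigit c ∧ pyDigit c < 10 := by
  obtain ⟨h1, h2⟩ := h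
  rw [Char.le_def] at h1 h2
  have h1' : 48 ≤ c.toNat := h1
  have h2' : c.toNat ≤ 57 := h2
  have hc : c = Char.ofNat c.toNat := (Char.ofNat_toNat c).symm
  set k := c.toNat with hk
  rw [hc]
  interval_cases k <;> decide

theorem map_pair_zip {α β γ : Type} (f : α → β → γ) : ∀ (l1 : List α) (l2 : List β),
    ((l1.zip l2).map fun p => f p.1 p.2) = List.zipWith f l1 l2 := by
  intro l1
  induction l1 with
  | nil => intro l2; simp
  | cons a t ih => intro l2; cases l2 with
    | nil => simp
    | cons b u => simp [ih]

theorem zipWith_reverse {α β γ : Type} (f : α → β → γ) : ∀ (l1 : List α) (l2 : List β),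
    l1.length = l2.length →
    List.zipWith f l1.reverse l2.reverse = (List.zipWith f l1 l2).reverse := by
  intro l1
  induction l1 with
  | nil => intro l2 h; simp
  | cons a t ih => intro l2 h; cases l2 with
    | nil => simp at h
    | cons b u =>
      have h' : t.length = u.length := by simpa using h
      simp only [List.reverse_cons, List.zipWith_cons_cons]
      rw [List.zipWith_append (by simp [h']), ih u h']
      simp

theorem valF_zipWith_add : ∀ (l1 l2 : List Int), l1.length = l2.length →
    valF (List.zipWith (· + ·) l1 l2) = valF l1 + valF l2 := by
  intro l1
  induction l1 with
  | nil =>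
    intro l2 h
    cases l2 with
    | nil => simp [valF]
    | cons b u => simp at h
  | cons a t ih => intro l2 h; cases l2 with
    | nil => simp at h
    | cons b u =>
      have h' : t.length = u.length := by simpa using h
      simp only [List.zipWith_cons_cons, valF, List.length_zipWith, h', min_self, ih u h']
      ring

theorem valF_adjacent : ∀ (l : List Int) (x : Int), l ≠ [] →
    valF (List.zipWith (· + ·) (x :: l) l) = valF (x :: l.dropLast) + valF l := by
  intro l
  induction l with
  | nil => intro x h; exact absurd rfl h
  | cons a rest ih =>
    intro x _
    cases rest with
    | nil => simp [valF]
    | cons b r =>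
      have hne : (b :: r) ≠ [] := by simp
      have hih := ih a hne
      have hmin : min (r.length + 1) r.length = r.length := by omega
      simp only [List.zipWith_cons_cons, valF, List.length_cons, List.length_zipWith,
        List.length_dropLast, List.dropLast_cons₂, hmin, Nat.add_sub_cancel] at hih ⊢
      linear_combination hih

theorem main_eq (n : String) (hpre : ∀ c ∈ n.toList, '0' ≤ c ∧ c ≤ '9') :
    multiply_by_11 n = multiply_by_11_alt n := by
  have hdm0 : pyDigit '0' = 0 := by decide
  set cs := n.toList with hcs
  set ds := cs.map pyDigit with hds
  set m : List Char := cs ++ ['0'] with hm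
  set ps := m.zip (m.drop 1) with hps
  set res0 : List Int := [0, pyDigit m.headI] with hres0
  set resF := ps.foldl stepA res0 with hresF
  set qs := (ds ++ [0]).reverse.zip ((0 :: ds).reverse) with hqs
  set F := qs.foldl stepB (0, ([] : List Int)) with hF
  -- digit bounds
  have hdsb : ∀ d ∈ ds, 0 ≤ d ∧ d < 10 := by
    intro d hd
    obtain ⟨c, hc, rfl⟩ := List.mem_map.mp hd
    exact pyDigit_bounds c (hpre c hc)
  have hmdig : ∀ c ∈ m, '0' ≤ c ∧ c ≤ '9' := by
    intro c hc
    rcases List.mem_append.mp hc with h | h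
    · exact hpre c h
    · simp at h; subst h; exact ⟨le_refl _, by decide⟩
  have hmmap : m.map pyDigit = ds ++ [0] := by
    rw [hm, List.map_append, hds]; simp [hdm0]
  -- A-side fold
  have hpsb : ∀ p ∈ ps, (0 ≤ pyDigit p.1 ∧ pyDigit p.1 < 10) ∧
      (0 ≤ pyDigit p.2 ∧ pyDigit p.2 < 10) := by
    intro p hp
    obtain ⟨h1, h2⟩ := List.of_mem_zip hp
    exact ⟨pyDigit_bounds _ (hmdig _ h1),
           pyDigit_bounds _ (hmdig _ (List.mem_of_mem_drop h2))⟩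
  have hheadmem : m.headI ∈ m := by
    cases hc : cs with
    | nil => simp [hm, hc]
    | cons a t => simp [hm, hc]
  have hheadb := pyDigit_bounds _ (hmdig _ hheadmem)
  have hres0b : ∀ d ∈ res0, 0 ≤ d ∧ d < 10 := by
    intro d hd
    rcases List.mem_cons.mp hd with h | h
    · subst h; omega
    · simp at h; subst h; exact hheadb
  have hres0v : valF res0 + 2 ≤ 10 ^ res0.length := by
    simp [hres0, valF]; omega
  obtain ⟨hAl, hAb, hAv⟩ := A_fold_spec ps res0 hpsb hres0b hres0v
  rw [← hresF] at hAl hAb hAv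
  have hmlen : m.length = cs.length + 1 := by simp [hm]
  have hpslen : ps.length = cs.length := by
    rw [hps, List.length_zip, List.length_drop, hmlen]; omega
  -- the per-position sums of A are the adjacent sums of ds ++ [0]
  have hsA : ps.map (fun p => pyDigit p.1 + pyDigit p.2) =
      List.zipWith (· + ·) (ds ++ [0]) ((ds ++ [0]).drop 1) := by
    rw [hps, map_pair_zip (fun a b => pyDigit a + pyDigit b) m (m.drop 1)]
    rw [show List.zipWith (fun a b => pyDigit a + pyDigit b) m (m.drop 1) =
      List.zipWith (· + ·) (List.map pyDigit m) (List.map pyDigit (m.drop 1)) from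
      (List.zipWith_map).symm]
    rw [List.map_drop, hmmap]
  -- A's total value is 11 * valF ds
  have hAval : valF resF = 11 * valF ds := by
    rw [hAv, hsA, hpslen]
    have hv0 : valF res0 = pyDigit m.headI := by simp [hres0, valF]
    rw [hv0]
    cases hc : cs with
    | nil =>
      have : ds = [] := by simp [hds, hc]
      rw [this]
      have : m.headI = '0' := by simp [hm, hc]
      rw [this, hdm0]
      simp [valF]
    | cons a t =>
      have hds' : ds = pyDigit a :: t.map pyDigit := by simp [hds, hc]
      have hhead : m.headI = a := by simp [hm, hc]
      rw [hds', hhead]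
      have hne : (t.map pyDigit ++ [0]) ≠ [] := by simp
      rw [show (pyDigit a :: t.map pyDigit) ++ [0] = pyDigit a :: (t.map pyDigit ++ [0]) from rfl]
      rw [show (pyDigit a :: (t.map pyDigit ++ [0])).drop 1 = t.map pyDigit ++ [0] from rfl]
      rw [valF_adjacent _ _ hne, List.dropLast_concat, valF_append_singleton]
      simp only [List.length_cons]
      rw [show valF (pyDigit a :: t.map pyDigit) =
        pyDigit a * 10 ^ (t.map pyDigit).length + valF (t.map pyDigit) from rfl]
      simp only [List.length_map]
      ring
  -- B-side fold
  have hqsb : ∀ q ∈ qs, (0 ≤ q.1 ∧ q.1 < 10) ∧ (0 ≤ q.2 ∧ q.2 < 10) := by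
    intro q hq
    obtain ⟨h1, h2⟩ := List.of_mem_zip hq
    rw [List.mem_reverse] at h1 h2
    constructor
    · rcases List.mem_append.mp h1 with h | h
      · exact hdsb _ h
      · simp at h; omega
    · rcases List.mem_cons.mp h2 with h | h
      · omega
      · exact hdsb _ h
  obtain ⟨hBl, hBb, hBc, hBv⟩ := B_fold_spec qs (0, ([] : List Int)) hqsb (le_refl 0) (by simp)
  rw [← hF] at hBl hBb hBc hBv
  have hqslen : qs.length = cs.length + 1 := by
    rw [hqs, List.length_zip]
    simp [hds]
  have hBlen : F.2.length = cs.length + 1 := by rw [hBl, hqslen]; simp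
  have hqmap : ((qs.map fun q => q.1 + q.2).reverse) = List.zipWith (· + ·) (ds ++ [0]) (0 :: ds) := by
    rw [hqs]
    simp only [map_pair_zip]
    rw [zipWith_reverse _ _ _ (by simp), List.reverse_reverse]
  have hBval : valF F.2.reverse + F.1 * 10 ^ (cs.length + 1) = 11 * valF ds := by
    have := hBv
    rw [hqmap] at this
    rw [valF_zipWith_add _ _ (by simp), valF_append_singleton] at this
    simp only [List.reverse_nil, List.length_nil, pow_zero, mul_one] at this
    rw [hBlen] at this
    rw [this]
    rw [show valF (0 :: ds) = 0 * 10 ^ ds.length + valF ds from rfl]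
    simp [valF]
    ring
  -- bounds on the final carry
  have hVds_lt : valF ds < 10 ^ cs.length := by
    have := valF_lt ds hdsb
    rwa [show ds.length = cs.length from by simp [hds]] at this
  have hVds_nn : 0 ≤ valF ds := valF_nonneg _ (fun x hx => (hdsb x hx).1)
  have houtnn : 0 ≤ valF F.2.reverse :=
    valF_nonneg _ (fun x hx => (hBb x (by simpa using hx)).1)
  have hP : (0:Int) < 10 ^ cs.length := by positivity
  have hcarry10 : F.1 < 10 := by
    have h1 : (F.1 * 10) * 10 ^ cs.length < 11 * 10 ^ cs.length := by
      have hpow : (10:Int) ^ (cs.length + 1) = 10 ^ cs.length * 10 := by rw [pow_succ]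
      nlinarith [hBval, houtnn, hVds_lt]
    have := lt_of_mul_lt_mul_right h1 (le_of_lt hP)
    omega
  -- the two final digit lists coincide
  have hlistEq : resF = F.1 :: F.2.reverse := by
    apply valF_eq_iff
    · simp only [hAl, hpslen, hres0, List.length_cons, List.length_reverse, hBlen,
        List.length_nil]
      omega
    · exact hAb
    · intro d hd
      rcases List.mem_cons.mp hd with h | h
      · subst h; exact ⟨hBc, hcarry10⟩
      · exact hBb d (by simpa using h)
    · rw [hAval]
      rw [show valF (F.1 :: F.2.reverse) =
        F.1 * 10 ^ F.2.reverse.length + valF F.2.reverse from rfl]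
      rw [List.length_reverse, hBlen]
      omega
  -- both returns are joins of the same digit list
  have hA : multiply_by_11 n =
      PySem.Str.join "" ((if resF.headI = 0 then resF.drop 1 else resF).map PySem.Int.toStr) := rfl
  have hB : multiply_by_11_alt n =
      PySem.Str.join "" ((if F.1 = 0 then F.2.reverse else F.1 :: F.2.reverse).map PySem.Int.toStr) := rfl
  rw [hA, hB, hlistEq]
  simp only [List.headI_cons, List.drop_one, List.tail_cons]

-- ===== VERDICT (by name: the statement is the Claim_ definition above) =====
theorem multiply_by_11_spec : Claim_equal_multiply_by_11 := by
  intro n _ hpre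
  unfold Spec_multiply_by_11
  unfold Pre_multiply_by_11 at hpre
  simp only [List.all_eq_true, Bool.and_eq_true, decide_eq_true_eq] at hpre
  exact main_eq n hpre
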